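-- pv_equiv track=rewrite | github.com/bugoverdose/examples | algorithms/programmers/dfsbfs/puzzlepieces/solution.py | to_squares
-- ===== SOURCE A (Python) =====
-- def to_squares(pieces):
--     min_y, max_y = 99, 0
--     min_x, max_x = 99, 0
--     for p in pieces:
--         min_y = min(min_y, p[0])
--         max_y = max(max_y, p[0])
--         min_x = min(min_x, p[1])
--         max_x = max(max_x, p[1])
--     max_y -= min_y
--     max_x -= min_x
--     square = [[0 for _ in range(max_x+1)] for _ in range(max_y+1)]
--     for p in pieces:
--         square[p[0] - min_y][p[1] - min_x] = 1
--     return square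
-- ===== SOURCE B (Python) =====
-- def to_squares(pieces):
--     ys = [p[0] for p in pieces]
--     xs = [p[1] for p in pieces]
--     min_y, max_y = min([99] + ys), max([0] + ys)
--     min_x, max_x = min([99] + xs), max([0] + xs)
--     cells = {(p[0], p[1]) for p in pieces}
--     return [[1 if (y + min_y, x + min_x) in cells else 0
--              for x in range(max_x - min_x + 1)]
--             for y in range(max_y - min_y + 1)]
-- ===== Notes on version B (the rewrite author's own statement) =====
-- stated objective: alternative
-- what changed: Bounds come from min/max over the coordinate lists with the 99/0 sentinels, and the grid is materialized by querying a set of piece coordinates at every output cell instead of allocating a zero grid and writing a mark per piece.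
import Mathlib
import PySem

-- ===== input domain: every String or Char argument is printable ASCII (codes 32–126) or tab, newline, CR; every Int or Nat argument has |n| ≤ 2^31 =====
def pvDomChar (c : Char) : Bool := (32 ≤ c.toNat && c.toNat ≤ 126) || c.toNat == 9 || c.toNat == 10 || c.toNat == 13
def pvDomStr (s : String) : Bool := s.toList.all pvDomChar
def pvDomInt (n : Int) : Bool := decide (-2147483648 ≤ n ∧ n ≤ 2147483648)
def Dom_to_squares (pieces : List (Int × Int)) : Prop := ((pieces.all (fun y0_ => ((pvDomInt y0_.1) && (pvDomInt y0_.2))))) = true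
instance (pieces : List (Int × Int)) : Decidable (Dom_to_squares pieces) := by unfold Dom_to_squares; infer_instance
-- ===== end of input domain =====

-- B builds the grid by querying a set of piece coordinates at every output cell instead of
-- allocating a zero grid and writing one mark per piece (alternative decomposition, same cost).

-- ===== PORT A =====
def to_squares (pieces : List (Int × Int)) : List (List Int) :=
  -- min_y, max_y = 99, 0 ; min_x, max_x = 99, 0 ; for p in pieces: running min/max
  let b := pieces.foldl
    (fun (s : Int × Int × Int × Int) p =>
      (min s.1 p.1, max s.2.1 p.1, min s.2.2.1 p.2, max s.2.2.2 p.2))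
    (99, 0, 99, 0)
  let min_y := b.1
  let max_y := b.2.1 - min_y           -- max_y -= min_y
  let min_x := b.2.2.1
  let max_x := b.2.2.2 - min_x         -- max_x -= min_x
  -- square = [[0 for _ in range(max_x+1)] for _ in range(max_y+1)]
  let square := (PySem.List.pyRange 0 (max_y + 1) 1).map
    (fun _ => (PySem.List.pyRange 0 (max_x + 1) 1).map (fun _ => (0 : Int)))
  -- for p in pieces: square[p[0] - min_y][p[1] - min_x] = 1
  -- (the indices are always in range, so Python never raises and never wraps; pySetD/pyGetD are exact here)
  pieces.foldl
    (fun sq p =>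
      PySem.List.pySetD sq (p.1 - min_y)
        (PySem.List.pySetD (PySem.List.pyGetD sq (p.1 - min_y) []) (p.2 - min_x) 1))
    square

-- ===== PORT B =====
def to_squares_alt (pieces : List (Int × Int)) : List (List Int) :=
  let ys := pieces.map (fun p => p.1)
  let xs := pieces.map (fun p => p.2)
  let min_y := (PySem.List.min? ((99 : Int) :: ys) (fun v => v)).getD 0   -- min([99] + ys), list nonempty
  let max_y := (PySem.List.max? ((0 : Int) :: ys) (fun v => v)).getD 0    -- max([0] + ys)
  let min_x := (PySem.List.min? ((99 : Int) :: xs) (fun v => v)).getD 0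
  let max_x := (PySem.List.max? ((0 : Int) :: xs) (fun v => v)).getD 0
  let cells : PySem.Set (Int × Int) := PySem.Set.ofList pieces            -- {(p[0], p[1]) for p in pieces}
  (PySem.List.pyRange 0 (max_y - min_y + 1) 1).map
    (fun y => (PySem.List.pyRange 0 (max_x - min_x + 1) 1).map
      (fun x => if PySem.Set.contains cells (y + min_y, x + min_x) then (1 : Int) else 0))

-- ===== PRECONDITION & SPEC =====
def Spec_to_squares (pieces : List (Int × Int)) (out : List (List Int)) : Prop := out = to_squares_alt pieces
instance (pieces : List (Int × Int)) (out : List (List Int)) : Decidable (Spec_to_squares pieces out) := by unfold Spec_to_squares; infer_instance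

-- ===== CLAIM (what is proved, stated in full; the proofs are below) =====
def Claim_equal_to_squares : Prop := ∀ (pieces : List (Int × Int)), Dom_to_squares pieces → Spec_to_squares pieces (to_squares pieces)

-- ===== LEMMAS AND PROOFS =====

-- the four running extrema of A's first loop, as plain folds
def pvMinY (l : List (Int × Int)) : Int := l.foldl (fun a p => min a p.1) 99
def pvMaxY (l : List (Int × Int)) : Int := l.foldl (fun a p => max a p.1) 0
def pvMinX (l : List (Int × Int)) : Int := l.foldl (fun a p => min a p.2) 99
def pvMaxX (l : List (Int × Int)) : Int := l.foldl (fun a p => max a p.2) 0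

-- the rectangular grid written as a double comprehension over a cell function
def pvGrid (H W : Int) (f : Int → Int → Int) : List (List Int) :=
  (PySem.List.pyRange 0 H 1).map (fun y => (PySem.List.pyRange 0 W 1).map (fun x => f y x))

theorem pvBounds_gen (l : List (Int × Int)) (a b c d : Int) :
    l.foldl (fun (s : Int × Int × Int × Int) p =>
        (min s.1 p.1, max s.2.1 p.1, min s.2.2.1 p.2, max s.2.2.2 p.2)) (a, b, c, d)
      = (l.foldl (fun a p => min a p.1) a, l.foldl (fun a p => max a p.1) b,
         l.foldl (fun a p => min a p.2) c, l.foldl (fun a p => max a p.2) d) := by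
  induction l generalizing a b c d with
  | nil => rfl
  | cons p t ih => simpa using ih (min a p.1) (max b p.1) (min c p.2) (max d p.2)

theorem pvBounds_eq (l : List (Int × Int)) :
    l.foldl (fun (s : Int × Int × Int × Int) p =>
        (min s.1 p.1, max s.2.1 p.1, min s.2.2.1 p.2, max s.2.2.2 p.2)) (99, 0, 99, 0)
      = (pvMinY l, pvMaxY l, pvMinX l, pvMaxX l) := by
  unfold pvMinY pvMaxY pvMinX pvMaxX
  exact pvBounds_gen l 99 0 99 0

theorem pvFoldl_min_init {g : (Int × Int) → Int} (l : List (Int × Int)) (a : Int) :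
    l.foldl (fun a q => min a (g q)) a ≤ a := by
  induction l generalizing a with
  | nil => exact le_refl a
  | cons q t ih => exact le_trans (ih (min a (g q))) (min_le_left _ _)

theorem pvLe_foldl_max_init {g : (Int × Int) → Int} (l : List (Int × Int)) (a : Int) :
    a ≤ l.foldl (fun a q => max a (g q)) a := by
  induction l generalizing a with
  | nil => exact le_refl a
  | cons q t ih => exact le_trans (le_max_left _ _) (ih (max a (g q)))

theorem pvFoldl_min_le {g : (Int × Int) → Int} {l : List (Int × Int)} {a : Int} {p : Int × Int}
    (h : p ∈ l) : l.foldl (fun a q => min a (g q)) a ≤ g p := by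
  induction l generalizing a with
  | nil => cases h
  | cons q t ih =>
    rcases List.mem_cons.mp h with rfl | hmem
    · exact le_trans (pvFoldl_min_init t _) (min_le_right _ _)
    · exact ih hmem

theorem pvLe_foldl_max {g : (Int × Int) → Int} {l : List (Int × Int)} {a : Int} {p : Int × Int}
    (h : p ∈ l) : g p ≤ l.foldl (fun a q => max a (g q)) a := by
  induction l generalizing a with
  | nil => cases h
  | cons q t ih =>
    rcases List.mem_cons.mp h with rfl | hmem
    · exact le_trans (le_max_right _ _) (pvLe_foldl_max_init t _)
    · exact ih hmem

theorem pvSetD_map_pyRange {α : Type} (g : Int → α) (H i : Int) (v : α)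
    (h0 : 0 ≤ i) (_h1 : i < H) :
    PySem.List.pySetD ((PySem.List.pyRange 0 H 1).map g) i v
      = (PySem.List.pyRange 0 H 1).map (fun y => if y = i then v else g y) := by
  rw [PySem.List.pySetD_of_nonneg _ _ h0]
  apply List.ext_getElem
  · simp
  · intro k hk1 hk2
    have hkH : (k : Int) < H := by
      simp [PySem.List.length_pyRange_one] at hk2
      omega
    simp only [List.getElem_set, List.getElem_map, PySem.List.getElem_pyRange_one]
    by_cases hki : (k : Int) = i
    · have : i.toNat = k := by omega
      simp [this, hki]
    · have : i.toNat ≠ k := by omega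
      simp [this, hki]

theorem pvGrid_congr {H W : Int} {f f' : Int → Int → Int}
    (h : ∀ y x, f y x = f' y x) : pvGrid H W f = pvGrid H W f' := by
  have : f = f' := funext fun y => funext fun x => h y x
  rw [this]

-- one assignment square[i][j] = 1 on a comprehension grid, indices in range
theorem pvUpd_grid (H W : Int) (f : Int → Int → Int) (i j : Int)
    (hi0 : 0 ≤ i) (hi1 : i < H) (hj0 : 0 ≤ j) (hj1 : j < W) :
    PySem.List.pySetD (pvGrid H W f) i
        (PySem.List.pySetD (PySem.List.pyGetD (pvGrid H W f) i []) j 1)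
      = pvGrid H W (fun y x => if y = i ∧ x = j then 1 else f y x) := by
  have hrow : PySem.List.pyGetD (pvGrid H W f) i []
      = (PySem.List.pyRange 0 W 1).map (fun x => f i x) := by
    unfold pvGrid
    exact PySem.List.pyGetD_map_pyRange_of_nonneg _ _ _ _ hi0 hi1
  rw [hrow]
  unfold pvGrid
  rw [pvSetD_map_pyRange (fun x => f i x) W j 1 hj0 hj1,
      pvSetD_map_pyRange _ H i _ hi0 hi1]
  apply List.map_congr_left
  intro y _
  by_cases hyi : y = i
  · subst hyi
    rw [if_pos rfl]
    apply List.map_congr_left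
    intro x _
    by_cases hxj : x = j <;> simp [hxj]
  · simp [hyi]

-- the whole marking loop, as one formula
theorem pvMark_loop (miny minx H W : Int) (l : List (Int × Int)) (f : Int → Int → Int)
    (hb : ∀ p ∈ l, 0 ≤ p.1 - miny ∧ p.1 - miny < H ∧ 0 ≤ p.2 - minx ∧ p.2 - minx < W) :
    l.foldl
        (fun sq p =>
          PySem.List.pySetD sq (p.1 - miny)
            (PySem.List.pySetD (PySem.List.pyGetD sq (p.1 - miny) []) (p.2 - minx) 1))
        (pvGrid H W f)
      = pvGrid H W (fun y x => if (y + miny, x + minx) ∈ l then 1 else f y x) := by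
  induction l generalizing f with
  | nil =>
    simp only [List.foldl_nil]
    exact pvGrid_congr (by intro y x; simp)
  | cons p t ih =>
    simp only [List.foldl_cons]
    have hp := hb p (List.mem_cons_self)
    rw [pvUpd_grid H W f (p.1 - miny) (p.2 - minx) hp.1 hp.2.1 hp.2.2.1 hp.2.2.2,
        ih (fun y x => if y = p.1 - miny ∧ x = p.2 - minx then 1 else f y x)
          (fun q hq => hb q (List.mem_cons_of_mem p hq))]
    apply pvGrid_congr
    intro y x
    by_cases ht : (y + miny, x + minx) ∈ t
    · simp [ht]
    · by_cases hpq : y = p.1 - miny ∧ x = p.2 - minx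
      · have hep : (y + miny, x + minx) = p := by
          obtain ⟨h1, h2⟩ := hpq
          cases p with
          | mk a b =>
            simp only [Prod.mk.injEq]
            omega
        simp [hpq]
      · have hne : (y + miny, x + minx) ≠ p := by
          intro he
          apply hpq
          cases p with
          | mk a b =>
            simp only [Prod.mk.injEq] at he
            omega
        simp [ht, hpq, hne]

-- both programs compute the same canonical grid
theorem pvA_eq (pieces : List (Int × Int)) :
    to_squares pieces
      = pvGrid (pvMaxY pieces - pvMinY pieces + 1) (pvMaxX pieces - pvMinX pieces + 1)
          (fun y x => if (y + pvMinY pieces, x + pvMinX pieces) ∈ pieces then 1 else 0) := by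
  have hb : ∀ p ∈ pieces,
      0 ≤ p.1 - pvMinY pieces ∧ p.1 - pvMinY pieces < pvMaxY pieces - pvMinY pieces + 1 ∧
      0 ≤ p.2 - pvMinX pieces ∧ p.2 - pvMinX pieces < pvMaxX pieces - pvMinX pieces + 1 := by
    intro p hp
    have h1 := pvFoldl_min_le (g := fun q => q.1) (a := 99) hp
    have h2 := pvLe_foldl_max (g := fun q => q.1) (a := 0) hp
    have h3 := pvFoldl_min_le (g := fun q => q.2) (a := 99) hp
    have h4 := pvLe_foldl_max (g := fun q => q.2) (a := 0) hp
    unfold pvMinY pvMaxY pvMinX pvMaxX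
    simp only at h1 h2 h3 h4
    refine ⟨by omega, by omega, by omega, by omega⟩
  unfold to_squares
  simp only [pvBounds_eq]
  exact (pvMark_loop (pvMinY pieces) (pvMinX pieces) _ _ pieces (fun _ _ => 0) hb).trans
    (pvGrid_congr (by intro y x; rfl))

theorem pvB_eq (pieces : List (Int × Int)) :
    to_squares_alt pieces
      = pvGrid (pvMaxY pieces - pvMinY pieces + 1) (pvMaxX pieces - pvMinX pieces + 1)
          (fun y x => if (y + pvMinY pieces, x + pvMinX pieces) ∈ pieces then 1 else 0) := by
  unfold to_squares_alt
  simp only [PySem.List.min?_id_cons, PySem.List.max?_id_cons, Option.getD_some, List.foldl_map]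
  apply pvGrid_congr
  intro y x
  simp [pvMinY, pvMinX, PySem.Set.mem_ofList]

-- ===== VERDICT (by name: the statement is the Claim_ definition above) =====
theorem to_squares_spec : Claim_equal_to_squares := by
  intro pieces _
  unfold Spec_to_squares
  rw [pvA_eq, pvB_eq]
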